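-- pv_equiv track=rewrite | github.com/alexander-paskal/ece143-hw | hw4/threshold_values.py | gather_values
-- ===== SOURCE A (Python) =====
-- from collections import Counter
-- import typing as tp
--
-- def map_bitstring(bitstrings: tp.List[str]) -> tp.Dict[str, int]:
--     """
--     Maps a list of bits to a numeric value, 0 or 1, depending on if
--     the number of 0s strictly exceeds the number of 1s
--     :param n:
--     :type n:
--     :return:
--     :rtype:
--     """
--
--     assert isinstance(bitstrings, list)
--     for bitstring in bitstrings:
--         assert set(bitstring).issubset({"1", "0"})
--     assert max(bitstrings, key=lambda x: len(x)) == min(bitstrings, key=lambda x: len(x))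
--
--     unique_bitstrings = set(bitstrings)
--
--     mapped_bitstrings = {}
--     for string in unique_bitstrings:
--         c = Counter(string)
--         mapped_bitstrings[string] = 0 if c["0"] > c["1"] else 1
--
--     return mapped_bitstrings
--
-- def gather_values(bitstrings: tp.List[str]) -> tp.Dict[str, tp.List[int]]:
--     """
--     Gathers the values my guy
--     :param bitstrings:
--     :type bitstrings:
--     :return:
--     :rtype:
--     """
--
--     maps = map_bitstring(bitstrings)
--
--     c = Counter(bitstrings)
--
--     gathered_values = {}
--     for k, v in c.items():
--         value = maps[k]
--         gathered_values[k] = [maps[k] for i in range(v)]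
--
--     return gathered_values
-- ===== SOURCE B (Python) =====
-- def gather_values(bitstrings):
--     # same input validation as the original module
--     assert isinstance(bitstrings, list)
--     for b in bitstrings:
--         assert set(b).issubset({"1", "0"})
--     assert max(bitstrings, key=lambda x: len(x)) == min(bitstrings, key=lambda x: len(x))
--
--     # One pass, no Counter, no intermediate bitstring->value dict: the 0/1 value
--     # is computed arithmetically per string and appended to its group directly.
--     gathered = {}
--     for b in bitstrings:
--         zeros = sum(ch == "0" for ch in b)
--         v = 0 if 2 * zeros > len(b) else 1
--         gathered[b] = gathered.get(b, []) + [v]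
--     return gathered
-- ===== Notes on version B (the rewrite author's own statement) =====
-- stated objective: simpler
-- what changed: After the same validation prologue, B drops A's three-stage pipeline (map_bitstring building a value dict via per-string Counters over set(bitstrings), then a Counter of the list, then per-key list replication) and instead makes one pass over the list, computing each string's 0/1 value arithmetically (2*zeros > len) and appending it to that key's group as it goes.
import Mathlib
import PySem

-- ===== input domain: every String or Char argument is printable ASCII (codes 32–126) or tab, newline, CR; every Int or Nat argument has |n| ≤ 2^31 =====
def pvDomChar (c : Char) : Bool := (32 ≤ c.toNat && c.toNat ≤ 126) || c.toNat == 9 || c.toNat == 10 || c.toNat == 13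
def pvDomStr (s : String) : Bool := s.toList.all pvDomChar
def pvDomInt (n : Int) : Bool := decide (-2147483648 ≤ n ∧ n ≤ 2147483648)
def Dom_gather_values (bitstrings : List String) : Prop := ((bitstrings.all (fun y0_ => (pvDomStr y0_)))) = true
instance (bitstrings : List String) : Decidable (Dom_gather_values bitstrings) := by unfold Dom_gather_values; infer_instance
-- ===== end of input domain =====

-- B replaces A's three-stage pipeline (map_bitstring via Counters over set(bitstrings), a
-- Counter of the list, per-key replication) by ONE pass that computes each string's 0/1
-- value arithmetically (2*zeros > len) and appends it to its group; simpler, same output.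

-- ===== PORT A =====
-- helper: A's map_bitstring (asserts, which only raise, are covered by Pre_; iteration over
-- set(bitstrings) is ported in Set.ofList order — the dict is only looked up afterwards)
def pvMapBitstring (bitstrings : List String) : PySem.Dict String Int :=
  let unique_bitstrings := PySem.Set.ofList bitstrings
  unique_bitstrings.foldl
    (fun mapped s =>
      let c := PySem.Dict.counter s.toList
      mapped.insert s (if c.getD '0' 0 > c.getD '1' 0 then 0 else 1))
    PySem.Dict.empty

def gather_values (bitstrings : List String) : List (String × List Int) :=
  let maps := pvMapBitstring bitstrings
  let c := PySem.Dict.counter bitstrings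
  (c.items.foldl
    (fun gathered kv =>
      gathered.insert kv.1 ((PySem.List.pyRange 0 kv.2 1).map (fun _ => maps.getD kv.1 0)))
    PySem.Dict.empty).items

-- ===== PORT B =====
-- (B's assert prologue — identical to A's — only raises; those inputs are outside Pre_)
def gather_values_alt (bitstrings : List String) : List (String × List Int) :=
  (bitstrings.foldl
    (fun gathered b =>
      let zeros : Int := b.toList.foldl (fun acc ch => acc + (if ch == '0' then 1 else 0)) 0
      let v : Int := if 2 * zeros > PySem.Str.len b then 0 else 1
      gathered.insert b (gathered.getD b [] ++ [v]))
    PySem.Dict.empty).items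

-- ===== PRECONDITION & SPEC =====
-- Pre_ excludes exactly the inputs on which Python A raises: an empty input list (Python's
-- max of an empty sequence raises ValueError) and lists with a non-0/1 character or unequal
-- string lengths (failed asserts); B happens to return the grouped dict on those inputs.
def Pre_gather_values (bitstrings : List String) : Prop :=
  (!bitstrings.isEmpty
    && bitstrings.all (fun s => s.toList.all (fun c => c == '0' || c == '1'))
    && bitstrings.all (fun s => s.toList.length == (bitstrings.headD "").toList.length)) = true
instance (bitstrings : List String) : Decidable (Pre_gather_values bitstrings) := by
  unfold Pre_gather_values; infer_instance

def pvWitness_gather_values : List String := (["01", "10", "01"])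

def Spec_gather_values (bitstrings : List String) (out : List (String × List Int)) : Prop := out = gather_values_alt bitstrings
instance (bitstrings : List String) (out : List (String × List Int)) : Decidable (Spec_gather_values bitstrings out) := by unfold Spec_gather_values; infer_instance

-- ===== CLAIM (what is proved, stated in full; the proofs are below) =====
def Claim_equal_gather_values : Prop := ∀ (bitstrings : List String), Dom_gather_values bitstrings → Pre_gather_values bitstrings → Spec_gather_values bitstrings (gather_values bitstrings)

-- ===== LEMMAS AND PROOFS =====

-- B's per-string value
def pvValB (b : String) : Int :=
  let zeros : Int := b.toList.foldl (fun acc ch => acc + (if ch == '0' then 1 else 0)) 0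
  if 2 * zeros > PySem.Str.len b then 0 else 1

theorem pvZeros_count (l : List Char) (init : Int) :
    l.foldl (fun acc ch => acc + (if ch == '0' then 1 else 0)) init = init + l.count '0' := by
  induction l generalizing init with
  | nil => simp
  | cons c l ih => simp [List.count_cons]; split <;> simp_all <;> ring

-- getD of the insert-loop building map_bitstring
theorem pvGetD_foldl_insert (f : String → Int) (l : List String) (d : PySem.Dict String Int)
    (k : String) (hk : k ∈ l) :
    (l.foldl (fun d x => d.insert x (f x)) d).getD k 0 = f k := by
  induction l generalizing d with
  | nil => cases hk
  | cons x l ih =>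
    simp only [List.foldl_cons]
    by_cases h : k ∈ l
    · exact ih _ h
    · have hkx : k = x := by
        cases hk with
        | head => rfl
        | tail _ h' => exact absurd h' h
      subst hkx
      have : ∀ (l : List String) (d : PySem.Dict String Int), k ∉ l →
          (l.foldl (fun d x => d.insert x (f x)) d).getD k 0 = d.getD k 0 := by
        intro l
        induction l with
        | nil => intro d _; rfl
        | cons y l ih2 =>
          intro d hne
          simp only [List.foldl_cons]
          rw [ih2 _ (by simp_all), PySem.Dict.getD_insert]
          simp_all
      rw [this l _ h, PySem.Dict.getD_insert_self]

theorem pvCount01 (l : List Char) (h : ∀ c ∈ l, c = '0' ∨ c = '1') :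
    l.count '0' + l.count '1' = l.length := by
  induction l with
  | nil => simp
  | cons c l ih =>
    have hc := h c (by simp)
    have ih' := ih (fun c hc => h c (by simp [hc]))
    simp only [List.count_cons, List.length_cons]
    rcases hc with h' | h' <;> subst h' <;> simp <;> omega

-- under Pre_, B's arithmetic value equals A's Counter-based mapped value
theorem pvValB_eq_maps (bitstrings : List String)
    (hpre : Pre_gather_values bitstrings) (k : String) (hk : k ∈ bitstrings) :
    pvValB k = (pvMapBitstring bitstrings).getD k 0 := by
  unfold pvMapBitstring
  rw [pvGetD_foldl_insert _ _ _ _ (by simpa using (PySem.Set.mem_ofList _ _).2 hk)]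
  unfold pvValB
  dsimp only
  rw [PySem.Dict.getD_counter, PySem.Dict.getD_counter]
  have h01 : ∀ c ∈ k.toList, c = '0' ∨ c = '1' := by
    unfold Pre_gather_values at hpre
    simp only [Bool.and_eq_true, List.all_eq_true] at hpre
    intro c hc
    have := hpre.1.2 k hk
    simpa using this c hc
  have hlen : k.toList.count '0' + k.toList.count '1' = k.toList.length :=
    pvCount01 k.toList h01
  rw [pvZeros_count]
  have hstrlen : PySem.Str.len k = (k.toList.length : Int) := by
    simp [PySem.Str.len_eq]
  rw [hstrlen]
  split_ifs with h1 h2 <;> try rfl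
  · exfalso; omega
  · exfalso; omega

-- A's gathered dict as a map over the distinct bitstrings
theorem gather_values_items (bitstrings : List String) :
    gather_values bitstrings =
      (PySem.Set.ofList bitstrings).map
        (fun k => (k, List.replicate (bitstrings.count k)
                        ((pvMapBitstring bitstrings).getD k 0))) := by
  unfold gather_values
  rw [PySem.Dict.items_foldl_insert_fresh _ _ _ _
        (by intro a _; exact PySem.Dict.contains_empty _)
        (by
          have : ((PySem.Dict.counter bitstrings).items.map (·.1)) =
              (PySem.Dict.counter bitstrings).keys := rfl
          rw [this]; exact PySem.Dict.nodup_keys_counter bitstrings)]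
  rw [PySem.Dict.items_counter, List.map_map]
  refine List.map_congr_left (fun k _ => ?_)
  simp only [Function.comp_def]
  rw [PySem.List.pyRange_zero_natCast, List.map_map]
  simp [Function.comp_def, List.map_const']

-- B's gathered dict as the same map, with B's arithmetic value
theorem gather_values_alt_items (bitstrings : List String) :
    gather_values_alt bitstrings =
      (PySem.Set.ofList bitstrings).map
        (fun k => (k, List.replicate (bitstrings.count k) (pvValB k))) := by
  show (bitstrings.foldl
      (fun gathered b => gathered.modify b [] (fun l => l ++ [pvValB b]))
      PySem.Dict.empty).items = _
  have hfold :
      (bitstrings.foldl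
        (fun gathered b => gathered.modify b [] (fun l => l ++ [pvValB b]))
        PySem.Dict.empty) =
      ((bitstrings.map (fun b => (b, pvValB b))).foldl
        (fun gathered p => gathered.modify p.1 [] (fun l => l ++ [p.2]))
        PySem.Dict.empty) := by
    rw [List.foldl_map]
  rw [hfold]
  set L := bitstrings.map (fun b => (b, pvValB b)) with hL
  set D := L.foldl (fun gathered p => gathered.modify p.1 [] (fun l => l ++ [p.2]))
      PySem.Dict.empty with hD
  have hkeys : D.keys = PySem.Set.ofList bitstrings := by
    rw [hD, PySem.Dict.keys_foldl_modify_key]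
    simp [hL, PySem.Set.ofList_eq_foldl, PySem.Set.update, PySem.Dict.keys_empty, List.foldl_map]
  have hnd : D.keys.Nodup := by
    rw [hD]
    exact PySem.Dict.nodup_keys_foldl_modify_key L (·.1) [] (fun d p l => l ++ [p.2]) _
      (by simp [PySem.Dict.keys_empty])
  rw [PySem.Dict.items_eq_map_keys D hnd [], hkeys]
  refine List.map_congr_left (fun k _ => ?_)
  have hget : D.getD k [] =
      [] ++ (L.filter (fun p => p.1 == k)).map (·.2) := by
    rw [hD]; exact PySem.Dict.getD_foldl_modify_append L PySem.Dict.empty k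
  rw [hget, hL, List.filter_map, List.map_map]
  have hfilter : (bitstrings.filter (fun b => b == k)) =
      List.replicate (bitstrings.count k) k := by simp [List.filter_beq]
  simp only [Function.comp_def, List.nil_append]
  rw [hfilter, List.map_replicate]

-- ===== VERDICT (by name: the statement is the Claim_ definition above) =====
theorem gather_values_spec : Claim_equal_gather_values := by
  intro bitstrings _ hpre
  unfold Spec_gather_values
  rw [gather_values_items, gather_values_alt_items]
  refine List.map_congr_left (fun k hk => ?_)
  rw [pvValB_eq_maps bitstrings hpre k (by simpa using (PySem.Set.mem_ofList _ _).1 hk)]
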